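-- pv_equiv track=rewrite | github.com/Thirupathi-702/daily_dsa | 1333-sort-the-jumbled-numbers/1333-sort-the-jumbled-numbers.py | sortJumbled
-- ===== SOURCE A (Python) =====
-- from typing import List
--
-- def sortJumbled(mapping: List[int], nums: List[int]) -> List[int]:
--     q=[]
--
--     for i in nums:
--         l=''
--         p=str(i)
--         for j in p:
--             t=int(j)
--             l+=str(mapping[t])
--         q.append(int(l))
--     d={}
--     for i in range(len(nums)):
--         d[nums[i]]=q[i]
--     nums.sort(key=lambda val:d[val])
--     return nums
-- ===== SOURCE B (Python) =====
-- from typing import List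
--
-- def sortJumbled(mapping: List[int], nums: List[int]) -> List[int]:
--     # hand-written stable merge sort on (mapped key, value) pairs; no dict, no built-in sort
--     def key(v: int) -> int:
--         return int(''.join(str(mapping[int(c)]) for c in str(v)))
--
--     def merge(xs, ys):
--         out = []
--         i = j = 0
--         while i < len(xs) and j < len(ys):
--             if ys[j][0] < xs[i][0]:
--                 out.append(ys[j]); j += 1
--             else:                       # ties taken from xs -> stable
--                 out.append(xs[i]); i += 1
--         out.extend(xs[i:]); out.extend(ys[j:])
--         return out
--
--     def msort(pairs):
--         if len(pairs) <= 1: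
--             return pairs
--         mid = len(pairs) // 2
--         return merge(msort(pairs[:mid]), msort(pairs[mid:]))
--
--     nums[:] = [v for _, v in msort([(key(v), v) for v in nums])]
--     return nums
-- ===== Notes on version B (the rewrite author's own statement) =====
-- stated objective: alternative
-- what changed: Replaces A's value-keyed dict (built in a separate index loop) plus the built-in key-function sort by a hand-written stable top-down merge sort over (mapped key, value) pairs: split in halves, recurse, merge taking ties from the left half for stability, then write the values back in place.
import Mathlib
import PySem

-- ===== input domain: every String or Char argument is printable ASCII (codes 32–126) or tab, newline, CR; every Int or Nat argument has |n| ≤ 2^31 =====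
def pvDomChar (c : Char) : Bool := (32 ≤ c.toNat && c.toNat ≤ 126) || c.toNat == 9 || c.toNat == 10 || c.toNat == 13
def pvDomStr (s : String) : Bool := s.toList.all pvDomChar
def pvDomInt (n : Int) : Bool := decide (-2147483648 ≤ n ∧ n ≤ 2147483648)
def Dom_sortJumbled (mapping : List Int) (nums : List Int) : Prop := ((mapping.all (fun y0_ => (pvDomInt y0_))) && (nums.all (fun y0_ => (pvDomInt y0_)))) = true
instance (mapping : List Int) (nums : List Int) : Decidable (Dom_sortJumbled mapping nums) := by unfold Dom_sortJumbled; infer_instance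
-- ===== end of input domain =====

-- B replaces A's value-keyed dict (built in a separate index loop) + built-in key sort by a
-- hand-written stable top-down merge sort over (mapped key, value) pairs. Both Pythons mutate
-- nums in place and return it; the theorems below are about the returned value (which equals
-- the mutated list in both).

-- ===== PORT A =====
-- inner loop of A: l=''; for j in str(i): l += str(mapping[int(j)]); then int(l)
def pvKeyA (mapping : List Int) (i : Int) : Int :=
  (PySem.Int.ofChars?
    ((PySem.Int.toChars i).foldl
      (fun l j =>
        l ++ PySem.Int.toChars (PySem.List.pyGetD mapping ((PySem.Int.ofChars? [j]).getD 0) 0))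
      [])).getD 0

def sortJumbled (mapping : List Int) (nums : List Int) : List Int :=
  let q : List Int := nums.foldl (fun q i => q ++ [pvKeyA mapping i]) []
  let d : PySem.Dict Int Int :=
    (PySem.List.pyRange 0 (PySem.List.len nums)).foldl
      (fun d i => d.insert (PySem.List.pyGetD nums i 0) (PySem.List.pyGetD q i 0))
      PySem.Dict.empty
  PySem.List.sorted nums (fun val => d.getD val 0) false

-- ===== PORT B =====
-- B's key(v): int(''.join(str(mapping[int(c)]) for c in str(v)))
def pvRemap (mapping : List Int) (v : Int) : Int :=
  (PySem.Int.ofChars?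
    (((PySem.Int.toChars v).map
        (fun c => PySem.Int.toChars (PySem.List.pyGetD mapping ((PySem.Int.ofChars? [c]).getD 0) 0))).flatten)).getD 0

-- B's merge: two-pointer loop taking ties from xs (stable); transcribed as the
-- obvious recursion on the two unread suffixes (out ++ extends = the emitted prefix)
def pvMerge : List (Int × Int) → List (Int × Int) → List (Int × Int)
  | [], ys => ys
  | x :: xs, [] => x :: xs
  | x :: xs, y :: ys =>
      if y.1 < x.1 then y :: pvMerge (x :: xs) ys
      else x :: pvMerge xs (y :: ys)
termination_by xs ys => xs.length + ys.length

-- B's msort: pairs[:mid] / pairs[mid:] with mid = len(pairs)//2 ≥ 0 are exactly take/drop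
def pvMsort (l : List (Int × Int)) : List (Int × Int) :=
  if _h : l.length ≤ 1 then l
  else pvMerge (pvMsort (l.take (l.length / 2))) (pvMsort (l.drop (l.length / 2)))
termination_by l.length
decreasing_by
  · simpa [List.length_take] using by omega
  · simpa [List.length_drop] using by omega

def sortJumbled_alt (mapping : List Int) (nums : List Int) : List Int :=
  (pvMsort (nums.map (fun v => (pvRemap mapping v, v)))).map (fun p => p.2)

-- ===== PRECONDITION & SPEC =====
-- decimal digit list of str(n) (for 0 ≤ n these are n's decimal digits)
def pvDigits (n : Int) : List Int := (PySem.Int.toChars n).map (fun c => ((c.toNat : Int) - 48))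

-- Pre_ excludes exactly the inputs where the Python A raises: a negative num
-- (int('-') → ValueError), a digit ≥ len(mapping) (IndexError), or a negative
-- mapped value at a non-first digit position (int('…-…') → ValueError).
def Pre_sortJumbled (mapping : List Int) (nums : List Int) : Prop :=
  ∀ n ∈ nums, 0 ≤ n ∧ (∀ d ∈ pvDigits n, d < mapping.length) ∧
    (∀ d ∈ (pvDigits n).tail, 0 ≤ PySem.List.pyGetD mapping d 0)
instance (mapping : List Int) (nums : List Int) : Decidable (Pre_sortJumbled mapping nums) := by
  unfold Pre_sortJumbled; infer_instance

def pvWitness_sortJumbled : List Int × List Int :=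
  ([8, 9, 4, 0, 2, 1, 3, 5, 7, 6], [991, 338, 38, 991])

def Spec_sortJumbled (mapping : List Int) (nums : List Int) (out : List Int) : Prop := out = sortJumbled_alt mapping nums
instance (mapping : List Int) (nums : List Int) (out : List Int) : Decidable (Spec_sortJumbled mapping nums out) := by unfold Spec_sortJumbled; infer_instance

-- ===== CLAIM (what is proved, stated in full; the proofs are below) =====
def Claim_equal_sortJumbled : Prop := ∀ (mapping : List Int) (nums : List Int), Dom_sortJumbled mapping nums → Pre_sortJumbled mapping nums → Spec_sortJumbled mapping nums (sortJumbled mapping nums)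

-- ===== LEMMAS AND PROOFS =====

-- the two key computations build the same character string
theorem keyA_eq_remap (mapping : List Int) (i : Int) : pvKeyA mapping i = pvRemap mapping i := by
  unfold pvKeyA pvRemap
  rw [PySem.List.foldl_append_eq_flatMap, List.flatMap_def, List.nil_append]

-- dict built by inserting (g i, k (g i)) maps every inserted key v to k v
theorem dict_get (k g : Int → Int) :
    ∀ (L : List Int) (d0 : PySem.Dict Int Int) (v : Int),
    ((∃ i ∈ L, g i = v) ∨ d0.get? v = some (k v)) →
    (L.foldl (fun d i => d.insert (g i) (k (g i))) d0).get? v = some (k v) := by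
  intro L
  induction L with
  | nil =>
    intro d0 v h
    rcases h with h | h
    · simp at h
    · simpa using h
  | cons i L ih =>
    intro d0 v h
    rw [List.foldl_cons]
    apply ih
    by_cases hgv : g i = v
    · right; rw [← hgv]; exact PySem.Dict.get?_insert_self _ _ _
    · rcases h with ⟨j, hj, hgj⟩ | h
      · rcases List.mem_cons.mp hj with rfl | hj'
        · exact absurd hgj hgv
        · exact Or.inl ⟨j, hj', hgj⟩
      · right; rw [PySem.Dict.get?_insert_of_ne _ _ (fun he => hgv he.symm)]; exact h

-- A's dict lookup is pvKeyA on every element of nums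
theorem dictD_eq_keyA (mapping : List Int) (nums : List Int) (v : Int) (hv : v ∈ nums) :
    ((PySem.List.pyRange 0 (PySem.List.len nums)).foldl
      (fun d i => d.insert (PySem.List.pyGetD nums i 0)
        (PySem.List.pyGetD (nums.foldl (fun q i => q ++ [pvKeyA mapping i]) []) i 0))
      PySem.Dict.empty).getD v 0 = pvKeyA mapping v := by
  rw [PySem.List.foldl_append_singleton_eq_map, List.nil_append]
  rw [PySem.List.foldl_congr_mem _ _
      (fun d i => d.insert (PySem.List.pyGetD nums i 0) (pvKeyA mapping (PySem.List.pyGetD nums i 0))) _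
      (by
        intro acc i hi
        rw [PySem.List.len_eq, PySem.List.mem_pyRange_one] at hi
        have h2 : i < (nums.length : Int) := hi.2
        have hn : PySem.List.pyGetD nums i 0 = nums[i.toNat] :=
          PySem.List.pyGetD_eq_getElem nums 0 hi.1 h2
        have hq : PySem.List.pyGetD (nums.map (pvKeyA mapping)) i 0 = pvKeyA mapping nums[i.toNat] := by
          rw [PySem.List.pyGetD_eq_getElem _ 0 hi.1 (by simpa using h2), List.getElem_map]
        simp only [hn, hq])]
  have hx : ((PySem.List.pyRange 0 (PySem.List.len nums)).foldl
      (fun d i => d.insert (PySem.List.pyGetD nums i 0) (pvKeyA mapping (PySem.List.pyGetD nums i 0)))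
      PySem.Dict.empty).get? v = some (pvKeyA mapping v) := by
    apply dict_get (pvKeyA mapping) (fun i => PySem.List.pyGetD nums i 0)
    left
    obtain ⟨j, hj, hje⟩ := List.mem_iff_getElem.mp hv
    refine ⟨(j : Int), ?_, ?_⟩
    · rw [PySem.List.len_eq, PySem.List.mem_pyRange_one]
      constructor <;> [positivity; exact_mod_cast hj]
    · rw [PySem.List.pyGetD_eq_getElem nums 0 (by positivity) (by exact_mod_cast hj)]
      simpa using hje
  rw [PySem.List.len_eq] at hx
  simp [PySem.Dict.getD, hx]

-- sorted with key kA = sorted with key k when the keys agree on the list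
theorem insertBy_congr_key (kA k : Int → Int) (x : Int) :
    ∀ (acc : List Int), (∀ y ∈ x :: acc, kA y = k y) →
    PySem.List.insertBy (fun a b => decide (kA a < kA b)) x acc
      = PySem.List.insertBy (fun a b => decide (k a < k b)) x acc := by
  intro acc
  induction acc with
  | nil => intro _; rfl
  | cons y t ih =>
    intro h
    have hx := h x List.mem_cons_self
    have hy := h y (List.mem_cons_of_mem _ List.mem_cons_self)
    rw [show PySem.List.insertBy (fun a b => decide (kA a < kA b)) x (y :: t)
        = if decide (kA x < kA y) then x :: y :: t
          else y :: PySem.List.insertBy (fun a b => decide (kA a < kA b)) x t from rfl]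
    rw [show PySem.List.insertBy (fun a b => decide (k a < k b)) x (y :: t)
        = if decide (k x < k y) then x :: y :: t
          else y :: PySem.List.insertBy (fun a b => decide (k a < k b)) x t from rfl]
    rw [hx, hy, ih (fun z hz => by
      rcases List.mem_cons.mp hz with rfl | hz
      · exact hx
      · exact h z (List.mem_cons_of_mem _ (List.mem_cons_of_mem _ hz)))]

theorem sorted_congr_key (kA k : Int → Int) (nums : List Int)
    (h : ∀ y ∈ nums, kA y = k y) :
    PySem.List.sorted nums kA false = PySem.List.sorted nums k false := by
  rw [PySem.List.sorted_eq_foldl_insertBy, PySem.List.sorted_eq_foldl_insertBy]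
  have : ∀ (xs : List Int) (acc : List Int),
      (∀ y, y ∈ xs ∨ y ∈ acc → kA y = k y) →
      xs.foldl (fun a x => PySem.List.insertBy (fun a b => decide (kA a < kA b)) x a) acc
        = xs.foldl (fun a x => PySem.List.insertBy (fun a b => decide (k a < k b)) x a) acc := by
    intro xs
    induction xs with
    | nil => intro acc _; rfl
    | cons x t ih =>
      intro acc hm
      rw [List.foldl_cons, List.foldl_cons,
        insertBy_congr_key kA k x acc (fun y hy => by
          rcases List.mem_cons.mp hy with rfl | hy
          · exact hm y (Or.inl List.mem_cons_self)
          · exact hm y (Or.inr hy))]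
      apply ih
      intro y hy
      rcases hy with hy | hy
      · exact hm y (Or.inl (List.mem_cons_of_mem _ hy))
      · rcases (PySem.List.mem_insertBy _ _ _ _).mp hy with rfl | hy
        · exact hm y (Or.inl List.mem_cons_self)
        · exact hm y (Or.inr hy)
  exact this nums [] (fun y hy => h y (by simpa using hy))

-- ---- characterization of A's stable sort: pairwise-ordered + per-key filters preserved ----

theorem filter_eq_nil_of_gt (k : Int → Int) (c : Int) (l : List Int)
    (h : ∀ z ∈ l, c < k z) : l.filter (fun v => decide (k v = c)) = [] := by
  rw [List.filter_eq_nil_iff]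
  intro z hz
  simp only [decide_eq_true_eq]
  have := h z hz; omega

theorem insertBy_pairwise (k : Int → Int) (x : Int) :
    ∀ (acc : List Int), acc.Pairwise (fun a b => k a ≤ k b) →
    (PySem.List.insertBy (fun a b => decide (k a < k b)) x acc).Pairwise (fun a b => k a ≤ k b) := by
  intro acc
  induction acc with
  | nil => intro _; simp [PySem.List.insertBy]
  | cons y t ih =>
    intro hp
    rw [List.pairwise_cons] at hp
    rw [show PySem.List.insertBy (fun a b => decide (k a < k b)) x (y :: t)
        = if decide (k x < k y) then x :: y :: t
          else y :: PySem.List.insertBy (fun a b => decide (k a < k b)) x t from rfl]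
    by_cases hc : k x < k y
    · rw [if_pos (by simp [hc])]
      rw [List.pairwise_cons]
      refine ⟨fun z hz => ?_, List.pairwise_cons.mpr hp⟩
      rcases List.mem_cons.mp hz with rfl | hz
      · omega
      · have := hp.1 z hz; omega
    · rw [if_neg (by simp [hc])]
      rw [List.pairwise_cons]
      refine ⟨fun z hz => ?_, ih hp.2⟩
      rcases (PySem.List.mem_insertBy _ _ _ _).mp hz with rfl | hz
      · omega
      · exact hp.1 z hz

theorem insertBy_filter (k : Int → Int) (c : Int) (x : Int) :
    ∀ (acc : List Int), acc.Pairwise (fun a b => k a ≤ k b) →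
    (PySem.List.insertBy (fun a b => decide (k a < k b)) x acc).filter (fun v => decide (k v = c))
      = acc.filter (fun v => decide (k v = c)) ++ (if k x = c then [x] else []) := by
  intro acc
  induction acc with
  | nil => intro _; simp [PySem.List.insertBy, List.filter]; split_ifs <;> simp_all
  | cons y t ih =>
    intro hp
    rw [List.pairwise_cons] at hp
    rw [show PySem.List.insertBy (fun a b => decide (k a < k b)) x (y :: t)
        = if decide (k x < k y) then x :: y :: t
          else y :: PySem.List.insertBy (fun a b => decide (k a < k b)) x t from rfl]
    by_cases hc : k x < k y
    · rw [if_pos (by simp [hc])]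
      by_cases hxc : k x = c
      · have hnil : (y :: t).filter (fun v => decide (k v = c)) = [] := by
          apply filter_eq_nil_of_gt
          intro z hz
          rcases List.mem_cons.mp hz with rfl | hz
          · omega
          · have := hp.1 z hz; omega
        rw [List.filter_cons, hnil]
        simp [hxc]
      · rw [List.filter_cons]
        simp [hxc]
    · rw [if_neg (by simp [hc]), List.filter_cons, List.filter_cons, ih hp.2]
      by_cases hyc : k y = c <;> simp [hyc]

theorem sorted_filter (k : Int → Int) (c : Int) (nums : List Int) :
    (PySem.List.sorted nums k false).filter (fun v => decide (k v = c))
      = nums.filter (fun v => decide (k v = c)) := by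
  rw [PySem.List.sorted_eq_foldl_insertBy]
  have : ∀ (xs : List Int) (acc : List Int), acc.Pairwise (fun a b => k a ≤ k b) →
      (xs.foldl (fun a x => PySem.List.insertBy (fun a b => decide (k a < k b)) x a) acc).filter
          (fun v => decide (k v = c))
        = acc.filter (fun v => decide (k v = c)) ++ xs.filter (fun v => decide (k v = c)) := by
    intro xs
    induction xs with
    | nil => intro acc _; simp
    | cons x t ih =>
      intro acc hp
      rw [List.foldl_cons, ih _ (insertBy_pairwise k x acc hp), insertBy_filter k c x acc hp,
        List.filter_cons]
      by_cases hxc : k x = c <;> simp [hxc]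
  simpa using this nums [] (by simp)

-- ---- B's merge sort: same characterization ----

theorem mem_pvMerge (z : Int × Int) :
    ∀ (xs ys : List (Int × Int)), z ∈ pvMerge xs ys ↔ z ∈ xs ∨ z ∈ ys := by
  intro xs ys
  fun_induction pvMerge xs ys with
  | case1 ys => simp
  | case2 x xs => simp
  | case3 x xs y ys hlt ih => simp only [List.mem_cons, ih]; tauto
  | case4 x xs y ys hlt ih => simp only [List.mem_cons, ih]; tauto

theorem pvMerge_pairwise :
    ∀ (xs ys : List (Int × Int)),
    xs.Pairwise (fun a b => a.1 ≤ b.1) → ys.Pairwise (fun a b => a.1 ≤ b.1) →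
    (pvMerge xs ys).Pairwise (fun a b => a.1 ≤ b.1) := by
  intro xs ys
  fun_induction pvMerge xs ys with
  | case1 ys => intro _ hy; exact hy
  | case2 x xs => intro hx _; exact hx
  | case3 x xs y ys hlt ih =>
    intro hx hy
    rw [List.pairwise_cons] at hy
    rw [List.pairwise_cons]
    refine ⟨fun z hz => ?_, ih hx hy.2⟩
    rcases (mem_pvMerge z _ _).mp hz with hz | hz
    · rcases List.mem_cons.mp hz with rfl | hz
      · omega
      · have h1 := (List.pairwise_cons.mp hx).1 z hz
        omega
    · exact hy.1 z hz
  | case4 x xs y ys hlt ih =>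
    intro hx hy
    rw [List.pairwise_cons] at hx
    rw [List.pairwise_cons]
    refine ⟨fun z hz => ?_, ih hx.2 hy⟩
    rcases (mem_pvMerge z _ _).mp hz with hz | hz
    · exact hx.1 z hz
    · rcases List.mem_cons.mp hz with rfl | hz
      · omega
      · have h1 := (List.pairwise_cons.mp hy).1 z hz
        omega

theorem filter_pair_eq_nil_of_gt (c : Int) (l : List (Int × Int))
    (h : ∀ z ∈ l, c < z.1) : l.filter (fun p => decide (p.1 = c)) = [] := by
  rw [List.filter_eq_nil_iff]
  intro z hz
  simp only [decide_eq_true_eq]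
  have := h z hz; omega

theorem pvMerge_filter (c : Int) :
    ∀ (xs ys : List (Int × Int)), xs.Pairwise (fun a b => a.1 ≤ b.1) →
    (pvMerge xs ys).filter (fun p => decide (p.1 = c))
      = xs.filter (fun p => decide (p.1 = c)) ++ ys.filter (fun p => decide (p.1 = c)) := by
  intro xs ys
  fun_induction pvMerge xs ys with
  | case1 ys => intro _; simp
  | case2 x xs => intro _; simp
  | case3 x xs y ys hlt ih =>
    intro hx
    rw [List.filter_cons, ih hx]
    by_cases hyc : y.1 = c
    · have hnil : (x :: xs).filter (fun p => decide (p.1 = c)) = [] := by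
        apply filter_pair_eq_nil_of_gt
        intro z hz
        rcases List.mem_cons.mp hz with rfl | hz
        · omega
        · have := (List.pairwise_cons.mp hx).1 z hz; omega
      simp [hyc, hnil]
    · simp [hyc]
  | case4 x xs y ys hlt ih =>
    intro hx
    rw [List.pairwise_cons] at hx
    rw [List.filter_cons, ih hx.2, List.filter_cons]
    by_cases hxc : x.1 = c <;> simp [hxc]

theorem pvMsort_pairwise :
    ∀ (l : List (Int × Int)), (pvMsort l).Pairwise (fun a b => a.1 ≤ b.1) := by
  intro l
  fun_induction pvMsort l with
  | case1 l h =>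
    match l, h with
    | [], _ => simp
    | [x], _ => simp
  | case2 l h ih1 ih2 =>
    exact pvMerge_pairwise _ _ ih1 ih2

theorem pvMsort_filter (c : Int) :
    ∀ (l : List (Int × Int)),
    (pvMsort l).filter (fun p => decide (p.1 = c)) = l.filter (fun p => decide (p.1 = c)) := by
  intro l
  fun_induction pvMsort l with
  | case1 l h => rfl
  | case2 l h ih1 ih2 =>
    rw [pvMerge_filter c _ _ (pvMsort_pairwise _), ih1, ih2, ← List.filter_append,
      List.take_append_drop]

theorem mem_pvMsort (z : Int × Int) (l : List (Int × Int)) : z ∈ pvMsort l ↔ z ∈ l := by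
  constructor <;> intro hz
  · have := pvMsort_filter z.1 l
    have hzf : z ∈ (pvMsort l).filter (fun p => decide (p.1 = z.1)) :=
      List.mem_filter.mpr ⟨hz, by simp⟩
    rw [this] at hzf
    exact (List.mem_filter.mp hzf).1
  · have := pvMsort_filter z.1 l
    have hzf : z ∈ l.filter (fun p => decide (p.1 = z.1)) :=
      List.mem_filter.mpr ⟨hz, by simp⟩
    rw [← this] at hzf
    exact (List.mem_filter.mp hzf).1

-- ---- uniqueness of the stable order: pairwise-sorted + equal per-key filters → equal ----

theorem stable_unique {α : Type} (f : α → Int) :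
    ∀ (l1 l2 : List α), l1.Pairwise (fun a b => f a ≤ f b) → l2.Pairwise (fun a b => f a ≤ f b) →
    (∀ c : Int, l1.filter (fun v => decide (f v = c)) = l2.filter (fun v => decide (f v = c))) →
    l1 = l2 := by
  intro l1
  induction l1 with
  | nil =>
    intro l2 _ _ hf
    cases l2 with
    | nil => rfl
    | cons y t =>
      have := hf (f y)
      simp at this
  | cons x t1 ih =>
    intro l2 hp1 hp2 hf
    cases l2 with
    | nil =>
      have := hf (f x)
      simp at this
    | cons y t2 =>
      have hmem1 : ∀ z : α, z ∈ x :: t1 ↔ z ∈ y :: t2 := by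
        intro z
        constructor <;> intro hz
        · have h1 : z ∈ (x :: t1).filter (fun v => decide (f v = f z)) :=
            List.mem_filter.mpr ⟨hz, by simp⟩
          rw [hf (f z)] at h1
          exact (List.mem_filter.mp h1).1
        · have h1 : z ∈ (y :: t2).filter (fun v => decide (f v = f z)) :=
            List.mem_filter.mpr ⟨hz, by simp⟩
          rw [← hf (f z)] at h1
          exact (List.mem_filter.mp h1).1
      have hxy : f x = f y := by
        have hx2 : x ∈ y :: t2 := (hmem1 x).mp List.mem_cons_self
        have hy1 : y ∈ x :: t1 := (hmem1 y).mpr List.mem_cons_self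
        have h1 : f y ≤ f x := by
          rcases List.mem_cons.mp hx2 with rfl | hx2
          · rfl
          · exact (List.pairwise_cons.mp hp2).1 x hx2
        have h2 : f x ≤ f y := by
          rcases List.mem_cons.mp hy1 with h | hy1
          · rw [h]
          · exact (List.pairwise_cons.mp hp1).1 y hy1
        omega
      have hhead := hf (f x)
      rw [List.filter_cons, List.filter_cons, if_pos (by simp), if_pos (by simp [hxy])] at hhead
      rw [List.cons_eq_cons] at hhead
      obtain ⟨hx_eq_y, htail⟩ := hhead
      subst hx_eq_y
      congr 1
      apply ih t2 (List.pairwise_cons.mp hp1).2 (List.pairwise_cons.mp hp2).2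
      intro c
      by_cases hc : f x = c
      · subst hc; exact htail
      · have := hf c
        rw [List.filter_cons, List.filter_cons] at this
        simpa [hc] using this

-- stable sort with key k = map snd of B's merge sort on (k v, v) pairs
theorem sorted_eq_msort (k : Int → Int) (nums : List Int) :
    PySem.List.sorted nums k false
      = (pvMsort (nums.map (fun v => (k v, v)))).map (fun p => p.2) := by
  have hpairkey : ∀ p ∈ pvMsort (nums.map (fun v => (k v, v))), p.1 = k p.2 := by
    intro p hp
    have := (mem_pvMsort p _).mp hp
    obtain ⟨v, _, hv⟩ := List.mem_map.mp this
    rw [← hv]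
  apply stable_unique k
  · exact PySem.List.sorted_pairwise nums k
  · rw [List.pairwise_map]
    refine (pvMsort_pairwise _).imp_of_mem ?_
    intro a b ha hb hab
    rw [← hpairkey a ha, ← hpairkey b hb]; exact hab
  · intro c
    rw [sorted_filter k c nums]
    rw [List.filter_map]
    have h1 : (pvMsort (nums.map (fun v => (k v, v)))).filter
          ((fun v => decide (k v = c)) ∘ (fun p => p.2))
        = (pvMsort (nums.map (fun v => (k v, v)))).filter (fun p => decide (p.1 = c)) := by
      apply List.filter_congr
      intro p hp
      simp [Function.comp, hpairkey p hp]
    rw [h1, pvMsort_filter c]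
    have h2 : (nums.map (fun v => (k v, v))).filter (fun p => decide (p.1 = c))
        = (nums.filter (fun v => decide (k v = c))).map (fun v => (k v, v)) := by
      rw [List.filter_map]
      exact congrArg _ (List.filter_congr (fun v _ => rfl))
    rw [h2, List.map_map]
    exact (List.map_id' _).symm

-- ===== VERDICT (by name: the statement is the Claim_ definition above) =====
theorem sortJumbled_spec : Claim_equal_sortJumbled := by
  intro mapping nums _ _
  show sortJumbled mapping nums = sortJumbled_alt mapping nums
  unfold sortJumbled sortJumbled_alt
  rw [sorted_congr_key _ (pvRemap mapping) nums
      (fun v hv => (dictD_eq_keyA mapping nums v hv).trans (keyA_eq_remap mapping v))]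
  exact sorted_eq_msort (pvRemap mapping) nums
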